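-- pv_equiv track=rewrite | github.com/udasahai/ServerHerd | server.py | remain
-- ===== SOURCE A (Python) =====
-- def remain(str):
-- 	str = str[::-1]
-- 	temp = ""
-- 	for i in str:
-- 		if i!= '\n':
-- 			temp += i
-- 		else:
-- 			break
-- 	return (temp[::-1])
-- ===== SOURCE B (Python) =====
-- def remain(str):
--     return str.split('\n')[-1]
-- ===== Notes on version B (the rewrite author's own statement) =====
-- stated objective: idiomatic
-- what changed: B partitions the string into newline-delimited segments with str.split and returns the last segment, replacing A's reverse-the-string / accumulate-until-newline / reverse-again character loop.
import Mathlib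
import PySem

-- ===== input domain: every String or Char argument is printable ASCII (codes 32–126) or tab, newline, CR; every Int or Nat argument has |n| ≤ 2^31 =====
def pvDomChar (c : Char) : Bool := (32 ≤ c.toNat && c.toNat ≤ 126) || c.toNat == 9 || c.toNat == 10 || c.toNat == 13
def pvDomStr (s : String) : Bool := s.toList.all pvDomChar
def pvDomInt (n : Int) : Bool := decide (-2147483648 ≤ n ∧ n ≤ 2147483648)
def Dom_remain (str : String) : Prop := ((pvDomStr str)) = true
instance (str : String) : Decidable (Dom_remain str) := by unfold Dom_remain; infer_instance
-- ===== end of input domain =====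

-- B replaces A's reverse / accumulate-until-newline / reverse loop by split('\n') + last segment (idiomatic).

-- ===== PORT A =====
-- for i in str: if i != '\n': temp += i else: break   (temp kept as List Char, appended on the right)
def remainLoopA : List Char → List Char → List Char
  | [], temp => temp
  | c :: rest, temp => if c != '\n' then remainLoopA rest (temp ++ [c]) else temp

def remain (str : String) : String :=
  let r := str.toList.reverse            -- str = str[::-1]
  let temp := remainLoopA r []           -- the for-loop with break
  String.ofList temp.reverse                 -- return temp[::-1]

-- ===== PORT B =====
def remain_alt (str : String) : String :=
  let parts := PySem.Chars.splitOn str.toList ['\n']       -- str.split('\n')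
  String.ofList ((PySem.List.pyGet? parts (-1)).getD [])       -- parts[-1]; split never returns [], default unreachable

-- ===== PRECONDITION & SPEC =====
def Spec_remain (str : String) (out : String) : Prop := out = remain_alt str
instance (str : String) (out : String) : Decidable (Spec_remain str out) := by unfold Spec_remain; infer_instance

-- ===== CLAIM (what is proved, stated in full; the proofs are below) =====
def Claim_equal_remain : Prop := ∀ (str : String), Dom_remain str → Spec_remain str (remain str)

-- ===== LEMMAS AND PROOFS =====

lemma remainLoopA_eq (cs temp : List Char) :
    remainLoopA cs temp = temp ++ cs.takeWhile (· != '\n') := by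
  induction cs generalizing temp with
  | nil => simp [remainLoopA]
  | cons c rest ih =>
    by_cases h : (c != '\n') = true
    · simp [remainLoopA, List.takeWhile, h, ih]
    · simp [remainLoopA, List.takeWhile, h]

lemma takeWhile_append_of_mem (l xs : List Char) (h : '\n' ∈ l) :
    (l ++ xs).takeWhile (· != '\n') = l.takeWhile (· != '\n') := by
  induction l with
  | nil => simp at h
  | cons a as ih =>
    by_cases ha : a = '\n'
    · subst ha; simp [List.takeWhile]
    · have : '\n' ∈ as := by
        rcases List.mem_cons.mp h with h' | h'
        · exact absurd h'.symm ha
        · exact h'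
      simp only [List.takeWhile_cons]
      simp [ha, ih this]

lemma takeWhile_of_not_mem (l : List Char) (h : '\n' ∉ l) :
    l.takeWhile (· != '\n') = l := by
  induction l with
  | nil => simp
  | cons a as ih =>
    have ha : a ≠ '\n' := fun e => h (e ▸ List.mem_cons_self)
    have has : '\n' ∉ as := fun e => h (List.mem_cons_of_mem _ e)
    simp only [List.takeWhile_cons]
    simp [ha, ih has]

lemma takeWhile_append_newline (l : List Char) (h : '\n' ∉ l) :
    (l ++ ['\n']).takeWhile (· != '\n') = l := by
  induction l with
  | nil => simp
  | cons a as ih =>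
    have ha : a ≠ '\n' := fun e => h (e ▸ List.mem_cons_self)
    have has : '\n' ∉ as := fun e => h (List.mem_cons_of_mem _ e)
    simp only [List.cons_append, List.takeWhile_cons]
    simp [ha, ih has]

lemma go_getLast? (fuel : ℕ) (l cur : List Char) (acc : List (List Char)) (hf : l.length ≤ fuel) :
    (PySem.Chars.splitOn.go ['\n'] fuel l cur acc).getLast? =
      some (if '\n' ∈ l then (l.reverse.takeWhile (· != '\n')).reverse
            else cur.reverse ++ l) := by
  induction fuel generalizing l cur acc with
  | zero =>
    have hl : l = [] := by
      cases l with
      | nil => rfl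
      | cons a as => simp at hf
    subst hl
    simp [PySem.Chars.splitOn.go]
  | succ fuel ih =>
    cases l with
    | nil => simp [PySem.Chars.splitOn.go]
    | cons c rest =>
      simp only [List.length_cons, Nat.add_le_add_iff_right] at hf
      by_cases hc : c = '\n'
      · subst hc
        rw [show PySem.Chars.splitOn.go ['\n'] (fuel + 1) ('\n' :: rest) cur acc
              = PySem.Chars.splitOn.go ['\n'] fuel rest [] (cur.reverse :: acc) by
            simp [PySem.Chars.splitOn.go, List.isPrefixOf]]
        rw [ih rest [] (cur.reverse :: acc) hf]
        by_cases hm : '\n' ∈ rest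
        · simp only [hm, if_true, List.mem_cons, or_true, if_true]
          rw [List.reverse_cons, takeWhile_append_of_mem _ _ (by simpa using hm)]
        · simp only [hm, if_false, List.mem_cons, or_false]
          rw [if_pos trivial]
          rw [List.reverse_cons, takeWhile_append_newline rest.reverse (by simpa using hm)]
          simp
      · rw [show PySem.Chars.splitOn.go ['\n'] (fuel + 1) (c :: rest) cur acc
              = PySem.Chars.splitOn.go ['\n'] fuel rest (c :: cur) acc by
            simp [PySem.Chars.splitOn.go, List.isPrefixOf, Ne.symm hc]]
        rw [ih rest (c :: cur) acc hf]
        by_cases hm : '\n' ∈ rest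
        · simp only [hm, if_true, List.mem_cons, or_true, if_true]
          rw [List.reverse_cons, takeWhile_append_of_mem _ _ (by simpa using hm)]
        · have hnm : '\n' ∉ c :: rest := by
            intro h
            rcases List.mem_cons.mp h with h' | h'
            · exact hc h'.symm
            · exact hm h'
          simp [hm, hnm]

-- ===== VERDICT (by name: the statement is the Claim_ definition above) =====
theorem remain_spec : Claim_equal_remain := by
  intro s _
  show remain s = remain_alt s
  simp only [remain, remain_alt, PySem.Chars.splitOn]
  rw [remainLoopA_eq, PySem.List.pyGet?_neg_one,
      go_getLast? (s.toList.length + 1) s.toList [] [] (by omega)]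
  by_cases hm : '\n' ∈ s.toList
  · simp [hm]
  · have h2 : '\n' ∉ s.toList.reverse := by simpa using hm
    simp [hm, takeWhile_of_not_mem _ h2]
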